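-- pv_equiv track=rewrite | github.com/nathanielcr96/TensorTonic-Solutions | lag-features/lag-features.py | lag_features
-- ===== SOURCE A (Python) =====
-- def lag_features(series, lags):
--     """
--     Create a lag feature matrix from the time series.
--     """
--     # Write code here
--
--     feature_matrix = []
--     row_id = 0
--
--     for t in range(max(lags), len(series)):
--         feature_matrix.append([])
--
--         for l in lags:
--             feature_matrix[row_id].append(series[t - l])
--
--         row_id += 1
--
--     return feature_matrix
-- ===== SOURCE B (Python) =====
-- def lag_features(series, lags):
--     """
--     Create a lag feature matrix from the time series.
--     """
--     m = max(lags)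
--     n = len(series)
--     # one column per lag, outer loop over lags, inner over time
--     columns = [[series[t - l] for t in range(m, n)] for l in lags]
--     # transpose to row-major
--     return [[col[i] for col in columns] for i in range(n - m)]
-- ===== Notes on version B (the rewrite author's own statement) =====
-- stated objective: alternative
-- what changed: B builds one column per lag (outer loop over lags, inner over time) and then transposes to rows, instead of A's row-at-a-time build with outer loop over time and a mutable row_id.
import Mathlib
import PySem

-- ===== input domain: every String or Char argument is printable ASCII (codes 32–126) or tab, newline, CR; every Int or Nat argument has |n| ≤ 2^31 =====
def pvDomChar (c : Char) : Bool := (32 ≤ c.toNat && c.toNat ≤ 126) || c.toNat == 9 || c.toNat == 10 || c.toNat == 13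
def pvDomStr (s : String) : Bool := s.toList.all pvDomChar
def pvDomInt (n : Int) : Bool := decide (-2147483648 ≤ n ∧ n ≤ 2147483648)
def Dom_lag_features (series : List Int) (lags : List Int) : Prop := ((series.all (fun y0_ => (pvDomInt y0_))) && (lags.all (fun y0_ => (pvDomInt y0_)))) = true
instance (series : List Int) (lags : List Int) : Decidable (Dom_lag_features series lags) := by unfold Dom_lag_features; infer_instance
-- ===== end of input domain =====

-- B builds one column per lag then transposes, instead of A's row-at-a-time build; objective: alternative decomposition, same cost.

-- ===== PORT A =====
-- outer loop over time t, inner loop over lags; each row appended element by element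
def lag_features (series : List Int) (lags : List Int) : List (List Int) :=
  (PySem.List.pyRange ((PySem.List.max? lags (fun x => x)).getD 0) (series.length) 1).foldl
    (fun fm t =>
      fm ++ [lags.foldl (fun row l => row ++ [PySem.List.pyGetD series (t - l) 0]) []])
    []

-- ===== PORT B =====
-- one column per lag (outer over lags, inner over time), then an index-based transpose
def lag_features_alt (series : List Int) (lags : List Int) : List (List Int) :=
  let m : Int := (PySem.List.max? lags (fun x => x)).getD 0
  let n : Int := series.length
  let columns : List (List Int) :=
    lags.map (fun l => (PySem.List.pyRange m n 1).map (fun t => PySem.List.pyGetD series (t - l) 0))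
  (PySem.List.pyRange 0 (n - m) 1).map (fun i => columns.map (fun col => PySem.List.pyGetD col i 0))

-- ===== PRECONDITION & SPEC =====
-- Pre_ is exactly where Python A returns: lags nonempty (else max raises ValueError), and either
-- all lags are nonnegative, or some lag ≥ len(series) (empty time range, result []); otherwise
-- a negative lag makes series[t - l] raise IndexError at t = len(series) - 1.
def Pre_lag_features (series : List Int) (lags : List Int) : Prop :=
  lags ≠ [] ∧ ((∀ l ∈ lags, 0 ≤ l) ∨ ∃ l ∈ lags, (series.length : Int) ≤ l)
instance (series : List Int) (lags : List Int) : Decidable (Pre_lag_features series lags) := by unfold Pre_lag_features; infer_instance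

def pvWitness_lag_features : List Int × List Int := ([1, 2, 3, 4], [1, 2])

def Spec_lag_features (series : List Int) (lags : List Int) (out : List (List Int)) : Prop := out = lag_features_alt series lags
instance (series : List Int) (lags : List Int) (out : List (List Int)) : Decidable (Spec_lag_features series lags out) := by unfold Spec_lag_features; infer_instance

-- ===== CLAIM (what is proved, stated in full; the proofs are below) =====
def Claim_equal_lag_features : Prop := ∀ (series : List Int) (lags : List Int), Dom_lag_features series lags → Pre_lag_features series lags → Spec_lag_features series lags (lag_features series lags)

-- ===== LEMMAS AND PROOFS =====

-- A's nested append-folds are the map of rows over the time range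
theorem lag_features_eq_map (series : List Int) (lags : List Int) :
    lag_features series lags =
      (PySem.List.pyRange ((PySem.List.max? lags (fun x => x)).getD 0) (series.length) 1).map
        (fun t => lags.map (fun l => PySem.List.pyGetD series (t - l) 0)) := by
  unfold lag_features
  rw [PySem.List.foldl_append_singleton_eq_map]
  simp only [List.nil_append]
  refine List.map_congr_left (fun t _ => ?_)
  rw [PySem.List.foldl_append_singleton_eq_map]
  simp

-- B's transpose of the columns is the same map of rows
theorem lag_features_alt_eq_map (series : List Int) (lags : List Int) :
    lag_features_alt series lags =
      (PySem.List.pyRange ((PySem.List.max? lags (fun x => x)).getD 0) (series.length) 1).map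
        (fun t => lags.map (fun l => PySem.List.pyGetD series (t - l) 0)) := by
  unfold lag_features_alt
  simp only []
  set m : Int := (PySem.List.max? lags (fun x => x)).getD 0 with hm
  set n : Int := (series.length : Int) with hn
  rw [PySem.List.pyRange_one 0 (n - m), PySem.List.pyRange_one m n]
  simp only [Int.sub_zero, List.map_map]
  refine List.map_congr_left (fun k hk => ?_)
  rw [List.mem_range] at hk
  refine List.map_congr_left (fun l _ => ?_)
  simp only [Function.comp, Int.zero_add, PySem.List.pyGetD_natCast]
  rw [List.getD_eq_getElem?_getD, List.getElem?_map, List.getElem?_range hk]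
  simp

-- ===== VERDICT (by name: the statement is the Claim_ definition above) =====
theorem lag_features_spec : Claim_equal_lag_features := by
  intro series lags _ _
  unfold Spec_lag_features
  rw [lag_features_eq_map, lag_features_alt_eq_map]
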